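-- pv_equiv track=rewrite | github.com/cshung/Competition | rosalind/mmch.py | mmch
-- ===== SOURCE A (Python) =====
-- def mmch(rna):
--   counts = {}
--   counts['A'] = 0
--   counts['U'] = 0
--   counts['C'] = 0
--   counts['G'] = 0
--   for n in rna:
--     counts[n] = counts[n] + 1
--   max_au = max(counts['A'], counts['U'])
--   min_au = min(counts['A'], counts['U'])
--   max_cg = max(counts['C'], counts['G'])
--   min_cg = min(counts['C'], counts['G'])
--   ans = 1
--   for i in range(max_au - min_au, max_au):
--     ans = ans * (i + 1)
--   for i in range(max_cg - min_cg, max_cg):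
--     ans = ans * (i + 1)
--   return ans
-- ===== SOURCE B (Python) =====
-- def _perm(n, k):
--     if k == 0:
--         return 1
--     return n * _perm(n - 1, k - 1)
--
--
-- def mmch(rna):
--     tally = [0, 0, 0, 0]
--     for n in rna:
--         tally['AUCG'.index(n)] += 1
--     a, u, c, g = tally
--     return _perm(max(a, u), min(a, u)) * _perm(max(c, g), min(c, g))
-- ===== Notes on version B (the rewrite author's own statement) =====
-- stated objective: alternative
-- what changed: The dict-based counting loop is replaced by a 4-slot list tally indexed via 'AUCG'.index(n), and the two iterative ascending range-product loops are replaced by a single recursive falling-factorial (permutation-count) helper applied to each pair.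
import Mathlib
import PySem

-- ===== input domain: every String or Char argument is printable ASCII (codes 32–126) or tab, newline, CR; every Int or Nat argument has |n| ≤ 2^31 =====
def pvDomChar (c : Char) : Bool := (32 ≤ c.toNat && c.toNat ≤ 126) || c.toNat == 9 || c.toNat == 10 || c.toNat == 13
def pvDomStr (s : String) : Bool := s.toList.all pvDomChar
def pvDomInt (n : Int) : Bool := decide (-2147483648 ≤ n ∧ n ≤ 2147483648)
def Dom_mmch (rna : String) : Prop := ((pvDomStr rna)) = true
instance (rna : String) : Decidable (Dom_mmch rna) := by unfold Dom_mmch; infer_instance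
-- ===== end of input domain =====

-- B replaces A's dict-counting loop by a list tally indexed via 'AUCG'.index(n) and A's two
-- iterative range-product loops by one recursive falling-factorial helper (alternative
-- decomposition, same O(n) cost).

-- ===== PORT A =====
def mmch (rna : String) : Int :=
  let counts : PySem.Dict Char Int :=
    ((((PySem.Dict.empty).insert 'A' 0).insert 'U' 0).insert 'C' 0).insert 'G' 0
  -- counts[n] = counts[n] + 1  (KeyError for n outside the four keys — excluded by Pre_mmch;
  -- inside Pre_ the key is always present, so getD is exact)
  let counts := rna.toList.foldl (fun d n => d.insert n (d.getD n 0 + 1)) counts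
  let max_au := max (counts.getD 'A' 0) (counts.getD 'U' 0)
  let min_au := min (counts.getD 'A' 0) (counts.getD 'U' 0)
  let max_cg := max (counts.getD 'C' 0) (counts.getD 'G' 0)
  let min_cg := min (counts.getD 'C' 0) (counts.getD 'G' 0)
  let ans : Int := 1
  let ans := (PySem.List.pyRange (max_au - min_au) max_au 1).foldl (fun a i => a * (i + 1)) ans
  let ans := (PySem.List.pyRange (max_cg - min_cg) max_cg 1).foldl (fun a i => a * (i + 1)) ans
  ans

-- ===== PORT B =====
-- Source B's _perm(n, k): k is always min(count, count) ≥ 0, so the Nat argument is exact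
def permRec (n : Int) : Nat → Int
  | 0 => 1
  | Nat.succ k => n * permRec (n - 1) k

-- the body of Source B's for-loop: tally['AUCG'.index(n)] += 1
-- ('AUCG'.index(n) raises ValueError for other characters — excluded by Pre_mmch;
-- inside Pre_ the found index is 0..3, so find/pySetD/pyGetD are exact)
def tallyStep (t : List Int) (n : Char) : List Int :=
  let i := PySem.Str.find "AUCG" (String.ofList [n])
  PySem.List.pySetD t i (PySem.List.pyGetD t i 0 + 1)

def mmch_alt (rna : String) : Int :=
  let tally : List Int := [0, 0, 0, 0]
  let tally := rna.toList.foldl tallyStep tally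
  -- a, u, c, g = tally  (tally always has length 4, so the indexed reads are exact)
  let a := PySem.List.pyGetD tally 0 0
  let u := PySem.List.pyGetD tally 1 0
  let c := PySem.List.pyGetD tally 2 0
  let g := PySem.List.pyGetD tally 3 0
  permRec (max a u) (min a u).toNat * permRec (max c g) (min c g).toNat

-- ===== PRECONDITION & SPEC =====
-- Pre_ excludes exactly the strings with a character outside {A,U,C,G}: there A's
-- 'counts[n] = counts[n] + 1' raises KeyError (and B's 'AUCG'.index(n) raises ValueError).
def Pre_mmch (rna : String) : Prop :=
  rna.toList.all (fun ch => ch = 'A' ∨ ch = 'U' ∨ ch = 'C' ∨ ch = 'G') = true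
instance (rna : String) : Decidable (Pre_mmch rna) := by unfold Pre_mmch; infer_instance
def pvWitness_mmch : String := "GAUCAU"

def Spec_mmch (rna : String) (out : Int) : Prop := out = mmch_alt rna
instance (rna : String) (out : Int) : Decidable (Spec_mmch rna out) := by unfold Spec_mmch; infer_instance

-- ===== CLAIM (what is proved, stated in full; the proofs are below) =====
def Claim_equal_mmch : Prop := ∀ (rna : String), Dom_mmch rna → Pre_mmch rna → Spec_mmch rna (mmch rna)

-- ===== LEMMAS AND PROOFS =====

lemma tallyStep_A (a u c g : Int) : tallyStep [a, u, c, g] 'A' = [a + 1, u, c, g] := by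
  have hf : PySem.Chars.find ['A', 'U', 'C', 'G'] ['A'] = 0 := by decide
  simp [tallyStep, hf, PySem.List.pySetD, PySem.List.pySet?, PySem.List.pyIdx?,
    PySem.List.pyGetD, PySem.List.pyGet?]

lemma tallyStep_U (a u c g : Int) : tallyStep [a, u, c, g] 'U' = [a, u + 1, c, g] := by
  have hf : PySem.Chars.find ['A', 'U', 'C', 'G'] ['U'] = 1 := by decide
  simp [tallyStep, hf, PySem.List.pySetD, PySem.List.pySet?, PySem.List.pyIdx?,
    PySem.List.pyGetD, PySem.List.pyGet?]

lemma tallyStep_C (a u c g : Int) : tallyStep [a, u, c, g] 'C' = [a, u, c + 1, g] := by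
  have hf : PySem.Chars.find ['A', 'U', 'C', 'G'] ['C'] = 2 := by decide
  simp [tallyStep, hf, PySem.List.pySetD, PySem.List.pySet?, PySem.List.pyIdx?,
    PySem.List.pyGetD, PySem.List.pyGet?]

lemma tallyStep_G (a u c g : Int) : tallyStep [a, u, c, g] 'G' = [a, u, c, g + 1] := by
  have hf : PySem.Chars.find ['A', 'U', 'C', 'G'] ['G'] = 3 := by decide
  simp [tallyStep, hf, PySem.List.pySetD, PySem.List.pySet?, PySem.List.pyIdx?,
    PySem.List.pyGetD, PySem.List.pyGet?]

-- B's tally loop computes the four nucleotide counts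
lemma tally_inv : ∀ (l : List Char),
    (∀ ch ∈ l, ch = 'A' ∨ ch = 'U' ∨ ch = 'C' ∨ ch = 'G') → ∀ (a u c g : Int),
    l.foldl tallyStep [a, u, c, g]
      = [a + l.count 'A', u + l.count 'U', c + l.count 'C', g + l.count 'G'] := by
  intro l
  induction l with
  | nil => intro _ a u c g; simp
  | cons x t ih =>
    intro h a u c g
    have ht : ∀ ch ∈ t, ch = 'A' ∨ ch = 'U' ∨ ch = 'C' ∨ ch = 'G' :=
      fun ch hc => h ch (List.mem_cons_of_mem _ hc)
    simp only [List.foldl_cons]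
    rcases h x (List.mem_cons_self) with hx | hx | hx | hx <;> subst hx
    · rw [tallyStep_A, ih ht]; simp; ring
    · rw [tallyStep_U, ih ht]; simp; ring
    · rw [tallyStep_C, ih ht]; simp; ring
    · rw [tallyStep_G, ih ht]; simp; ring

-- pulling the accumulator out of A's product loop
lemma mul_foldl (l : List Int) : ∀ (x : Int),
    l.foldl (fun a i => a * (i + 1)) x = x * l.foldl (fun a i => a * (i + 1)) 1 := by
  induction l with
  | nil => intro x; simp
  | cons y t ih =>
    intro x
    simp only [List.foldl_cons]
    rw [ih (x * (y + 1)), ih (1 * (y + 1))]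
    ring

-- A's ascending range product equals B's recursive falling factorial
lemma range_prod_eq_permRec : ∀ (k : Nat) (m : Int), (k : Int) ≤ m →
    (PySem.List.pyRange (m - k) m 1).foldl (fun a i => a * (i + 1)) 1 = permRec m k := by
  intro k
  induction k with
  | zero =>
    intro m h
    rw [show m - ((0 : Nat) : Int) = m by simp, PySem.List.pyRange_one_eq_nil le_rfl]
    simp [permRec]
  | succ k ih =>
    intro m h
    have h1 : m - (k + 1 : Nat) ≤ m - 1 := by push_cast; omega
    have h2 : PySem.List.pyRange (m - (k + 1 : Nat)) m 1
        = PySem.List.pyRange ((m - 1) - k) (m - 1) 1 ++ [m - 1] := by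
      have := PySem.List.pyRange_one_succ_right (a := m - (k + 1 : Nat)) (b := m - 1) h1
      rw [show (m : Int) - 1 + 1 = m by ring] at this
      rw [this]
      congr 1
      push_cast
      ring_nf
    rw [h2, List.foldl_append, mul_foldl, ih (m - 1) (by push_cast at h ⊢; omega), permRec]
    simp only [List.foldl]
    ring

lemma mmch_eq_alt (rna : String) (hp : Pre_mmch rna) : mmch rna = mmch_alt rna := by
  have h : ∀ ch ∈ rna.toList, ch = 'A' ∨ ch = 'U' ∨ ch = 'C' ∨ ch = 'G' := by
    simpa [Pre_mmch] using hp
  unfold mmch mmch_alt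
  simp only [PySem.Dict.getD_foldl_insert_add_one]
  have d0 : ∀ c : Char,
      (((((PySem.Dict.empty).insert 'A' (0:Int)).insert 'U' 0).insert 'C' 0).insert 'G' 0).getD c 0
      = 0 := by
    intro c
    simp [PySem.Dict.getD_insert]
  simp only [d0, zero_add]
  have g4 : ∀ (w x y z : Int),
      PySem.List.pyGetD [w, x, y, z] 0 0 = w ∧ PySem.List.pyGetD [w, x, y, z] 1 0 = x ∧
      PySem.List.pyGetD [w, x, y, z] 2 0 = y ∧ PySem.List.pyGetD [w, x, y, z] 3 0 = z := by
    intro w x y z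
    refine ⟨?_, ?_, ?_, ?_⟩ <;>
      simp [PySem.List.pyGetD, PySem.List.pyGet?, PySem.List.pyIdx?]
  rw [tally_inv rna.toList h 0 0 0 0]
  simp only [zero_add]
  obtain ⟨g0, g1, g2, g3⟩ := g4 (rna.toList.count 'A') (rna.toList.count 'U')
    (rna.toList.count 'C') (rna.toList.count 'G')
  rw [g0, g1, g2, g3]
  set na := rna.toList.count 'A'
  set nu := rna.toList.count 'U'
  set nc := rna.toList.count 'C'
  set ng := rna.toList.count 'G'
  have e1 : max ((na:Int)) (nu:Int) = ((max na nu : Nat) : Int) := by simp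
  have e2 : min ((na:Int)) (nu:Int) = ((min na nu : Nat) : Int) := by simp
  have e3 : max ((nc:Int)) (ng:Int) = ((max nc ng : Nat) : Int) := by simp
  have e4 : min ((nc:Int)) (ng:Int) = ((min nc ng : Nat) : Int) := by simp
  rw [e1, e2, e3, e4, mul_foldl,
    range_prod_eq_permRec (min na nu) ((max na nu : Nat) : Int) (by exact_mod_cast min_le_max),
    range_prod_eq_permRec (min nc ng) ((max nc ng : Nat) : Int) (by exact_mod_cast min_le_max),
    Int.toNat_natCast, Int.toNat_natCast]

-- ===== VERDICT (by name: the statement is the Claim_ definition above) =====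
theorem mmch_spec : Claim_equal_mmch := by
  intro rna _ hp
  unfold Spec_mmch
  exact mmch_eq_alt rna hp
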